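-- pv_equiv track=rewrite | github.com/ryugahidiky/my_utils | Codejam/Qualification Round 2020/Vestigium/Vestigium.py | solve
-- ===== SOURCE A (Python) =====
-- def solve(matrix,n):
-- 	k=0
-- 	r=0
-- 	c=0
-- 	first=True
-- 	for i in range(n):
-- 		row=matrix[i]
-- 		if len(row) != len(set(row)):
-- 			r+=1
-- 		for j in range(n):
-- 			if(i==j):
-- 				k+=matrix[i][j]
--
-- 			if(first):
-- 				column=[row[j] for row in matrix]
-- 				if len(column) != len(set(column)):
-- 					c+=1
--
-- 		first=False
-- 	return k,r,c
-- ===== SOURCE B (Python) =====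
-- def solve(matrix, n):
--     # duplicate test by sorting and scanning for an equal adjacent pair,
--     # instead of comparing len(xs) with len(set(xs))
--     def has_dup(xs):
--         ys = sorted(xs)
--         return any(ys[t] == ys[t + 1] for t in range(len(ys) - 1))
--     k = 0
--     r = 0
--     for i in range(n):
--         k += matrix[i][i]
--         r += has_dup(matrix[i])
--     c = sum(has_dup([row[j] for row in matrix]) for j in range(n))
--     return k, r, c
-- ===== Notes on version B (the rewrite author's own statement) =====
-- stated objective: alternative
-- what changed: Duplicate detection is done by sorting each row/column and scanning for an equal adjacent pair instead of A's hash-set size comparison, and A's merged flag-gated loop is replaced by a trace+rows loop and a separate column pass.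
import Mathlib
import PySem

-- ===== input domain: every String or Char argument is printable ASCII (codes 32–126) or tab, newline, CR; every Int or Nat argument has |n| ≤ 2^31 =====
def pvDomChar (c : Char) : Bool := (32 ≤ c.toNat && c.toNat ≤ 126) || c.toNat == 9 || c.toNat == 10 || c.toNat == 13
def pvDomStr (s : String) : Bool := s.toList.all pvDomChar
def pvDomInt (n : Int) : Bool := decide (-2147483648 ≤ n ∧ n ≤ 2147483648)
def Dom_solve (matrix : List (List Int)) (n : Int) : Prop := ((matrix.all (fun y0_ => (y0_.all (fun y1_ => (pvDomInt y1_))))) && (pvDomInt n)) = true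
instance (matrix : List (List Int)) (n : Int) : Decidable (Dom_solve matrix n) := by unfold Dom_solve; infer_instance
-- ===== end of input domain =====

-- B detects duplicates by sorting and scanning for an equal adjacent pair instead of A's
-- set-size comparison, and replaces A's flag-gated merged loop by separate passes (objective: alternative).


-- ===== PORT A =====
-- state st = (k, r, c, first); row/element access via pyGetD (total form; Pre_ keeps indices in range)
def solve (matrix : List (List Int)) (n : Int) : Int × Int × Int :=
  let res := (PySem.List.pyRange 0 n 1).foldl (fun st i =>
    let row := PySem.List.pyGetD matrix i []
    let r' := if row.length ≠ (PySem.Set.ofList row).length then st.2.1 + 1 else st.2.1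
    let kc := (PySem.List.pyRange 0 n 1).foldl (fun kc j =>
      ((if i = j then kc.1 + PySem.List.pyGetD (PySem.List.pyGetD matrix i []) j 0 else kc.1),
       (if st.2.2.2 then
          (if (matrix.map (fun row => PySem.List.pyGetD row j 0)).length ≠
              (PySem.Set.ofList (matrix.map (fun row => PySem.List.pyGetD row j 0))).length
           then kc.2 + 1 else kc.2)
        else kc.2)))
      (st.1, st.2.2.1)
    (kc.1, r', kc.2, false))
    ((0 : Int), (0 : Int), (0 : Int), true)
  (res.1, res.2.1, res.2.2.1)

-- ===== PORT B =====
-- has_dup(xs): sort, then any adjacent equal pair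
def hasDup (xs : List Int) : Bool :=
  let ys := PySem.List.sorted xs (fun x => x) false
  (PySem.List.pyRange 0 ((ys.length : Int) - 1) 1).any
    (fun t => PySem.List.pyGetD ys t 0 == PySem.List.pyGetD ys (t + 1) 0)

def solve_alt (matrix : List (List Int)) (n : Int) : Int × Int × Int :=
  let kr := (PySem.List.pyRange 0 n 1).foldl (fun kr i =>
      (kr.1 + PySem.List.pyGetD (PySem.List.pyGetD matrix i []) i 0,
       kr.2 + (if hasDup (PySem.List.pyGetD matrix i []) then 1 else 0)))
    ((0 : Int), (0 : Int))
  let c := ((PySem.List.pyRange 0 n 1).map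
      (fun j => if hasDup (matrix.map (fun row => PySem.List.pyGetD row j 0)) then (1 : Int) else 0)).sum
  (kr.1, kr.2, c)

-- ===== PRECONDITION & SPEC =====
-- Pre_ excludes exactly the inputs on which Python A raises IndexError: n > 0 with fewer
-- than n rows, or some row (anywhere in the matrix, since columns scan all rows) shorter than n.
def Pre_solve (matrix : List (List Int)) (n : Int) : Prop :=
  n ≤ 0 ∨ (n ≤ (matrix.length : Int) ∧ ∀ row ∈ matrix, n ≤ (row.length : Int))
instance (matrix : List (List Int)) (n : Int) : Decidable (Pre_solve matrix n) := by
  unfold Pre_solve; infer_instance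
def pvWitness_solve : List (List Int) × Int := ([[1, 2], [3, 3]], 2)
def Spec_solve (matrix : List (List Int)) (n : Int) (out : Int × Int × Int) : Prop := out = solve_alt matrix n
instance (matrix : List (List Int)) (n : Int) (out : Int × Int × Int) : Decidable (Spec_solve matrix n out) := by unfold Spec_solve; infer_instance

-- ===== CLAIM (what is proved, stated in full; the proofs are below) =====
def Claim_equal_solve : Prop := ∀ (matrix : List (List Int)) (n : Int), Dom_solve matrix n → Pre_solve matrix n → Spec_solve matrix n (solve matrix n)

-- ===== LEMMAS AND PROOFS =====

-- the inner trace accumulation ignores all j ≠ i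
theorem foldl_ite_add_not_mem (l : List Int) (m : Int → Int) (i k : Int) (hi : i ∉ l) :
    l.foldl (fun a j => if i = j then a + m j else a) k = k := by
  induction l generalizing k with
  | nil => rfl
  | cons x xs ih =>
    simp only [List.mem_cons, not_or] at hi
    simp only [List.foldl_cons, if_neg (fun h => hi.1 h)]
    exact ih k hi.2

-- on a nodup list containing i, the inner trace fold adds exactly m i
theorem foldl_ite_add_eq (l : List Int) (m : Int → Int) (i k : Int)
    (hnd : l.Nodup) (hi : i ∈ l) :
    l.foldl (fun a j => if i = j then a + m j else a) k = k + m i := by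
  induction l generalizing k with
  | nil => cases hi
  | cons x xs ih =>
    simp only [List.nodup_cons] at hnd
    simp only [List.foldl_cons]
    rcases List.mem_cons.mp hi with h | h
    · subst h
      rw [if_pos rfl, foldl_ite_add_not_mem _ _ _ _ hnd.1]
    · have hne : i ≠ x := fun he => hnd.1 (he ▸ h)
      rw [if_neg hne]
      exact ih k hnd.2 h

-- full characterisation of A's outer loop: k and r accumulate the diagonal sum and the
-- duplicate-row count; c gains the whole duplicate-column count once, on the first
-- iteration with the flag still set, and the flag drops as soon as one iteration ran.
theorem outer_loop (matrix : List (List Int)) (L : List Int) (hnd : L.Nodup)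
    (l : List Int) (hl : ∀ i ∈ l, i ∈ L) (k r c : Int) (b : Bool) :
    l.foldl (fun st i =>
      ((L.foldl (fun kc j =>
          ((if i = j then kc.1 + PySem.List.pyGetD (PySem.List.pyGetD matrix i []) j 0 else kc.1),
           (if st.2.2.2 = true then
              (if (matrix.map (fun row => PySem.List.pyGetD row j 0)).length ≠
                  (PySem.Set.ofList (matrix.map (fun row => PySem.List.pyGetD row j 0))).length
               then kc.2 + 1 else kc.2)
            else kc.2)))
         (st.1, st.2.2.1)).1,
       (if (PySem.List.pyGetD matrix i []).length ≠
           (PySem.Set.ofList (PySem.List.pyGetD matrix i [])).length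
        then st.2.1 + 1 else st.2.1),
       (L.foldl (fun kc j =>
          ((if i = j then kc.1 + PySem.List.pyGetD (PySem.List.pyGetD matrix i []) j 0 else kc.1),
           (if st.2.2.2 = true then
              (if (matrix.map (fun row => PySem.List.pyGetD row j 0)).length ≠
                  (PySem.Set.ofList (matrix.map (fun row => PySem.List.pyGetD row j 0))).length
               then kc.2 + 1 else kc.2)
            else kc.2)))
         (st.1, st.2.2.1)).2,
       false)) (k, r, c, b)
    = (k + (l.map (fun i => PySem.List.pyGetD (PySem.List.pyGetD matrix i []) i 0)).sum,
       r + (l.map (fun i =>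
              if (PySem.List.pyGetD matrix i []).length ≠
                 (PySem.Set.ofList (PySem.List.pyGetD matrix i [])).length
              then (1 : Int) else 0)).sum,
       (if b = true ∧ l ≠ [] then
          L.foldl (fun a j =>
            if (matrix.map (fun row => PySem.List.pyGetD row j 0)).length ≠
               (PySem.Set.ofList (matrix.map (fun row => PySem.List.pyGetD row j 0))).length
            then a + 1 else a) c
        else c),
       (if l = [] then b else false)) := by
  induction l generalizing k r c b with
  | nil => simp
  | cons x xs ih =>
    have hx := hl x (List.mem_cons_self ..)
    simp only [List.foldl_cons]
    cases b with
    | false =>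
      simp only [Bool.false_eq_true, if_false]
      rw [PySem.List.foldl_prod_mk
          (f := fun a j => if x = j then a + PySem.List.pyGetD (PySem.List.pyGetD matrix x []) j 0 else a)
          (g := fun a (_ : Int) => a)]
      rw [foldl_ite_add_eq _ _ _ _ hnd hx, List.foldl_fixed]
      rw [ih (fun i hi => hl i (List.mem_cons_of_mem _ hi))]
      simp only [List.map_cons, List.sum_cons, Prod.mk.injEq, List.cons_ne_nil,
        Bool.false_eq_true, false_and, if_false]
      split_ifs <;> refine ⟨by ring, by ring, ?_⟩ <;> trivial
    | true =>
      simp only [if_true]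
      rw [PySem.List.foldl_prod_mk
          (f := fun a j => if x = j then a + PySem.List.pyGetD (PySem.List.pyGetD matrix x []) j 0 else a)
          (g := fun a j =>
            if (matrix.map (fun row => PySem.List.pyGetD row j 0)).length ≠
               (PySem.Set.ofList (matrix.map (fun row => PySem.List.pyGetD row j 0))).length
            then a + 1 else a)]
      rw [foldl_ite_add_eq _ _ _ _ hnd hx]
      rw [ih (fun i hi => hl i (List.mem_cons_of_mem _ hi))]
      simp only [List.map_cons, List.sum_cons, Prod.mk.injEq, List.cons_ne_nil,
        Bool.false_eq_true, false_and, if_false, ne_eq, not_false_eq_true, and_true, if_true]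
      split_ifs <;> refine ⟨by ring, by ring, ?_⟩ <;> trivial

-- a list that is pairwise ≤ fails Nodup exactly when two ADJACENT entries are equal
theorem pairwise_le_not_nodup_iff (ys : List Int) (h : ys.Pairwise (· ≤ ·)) :
    ¬ ys.Nodup ↔ ∃ u : Nat, ∃ hu : u + 1 < ys.length, ys[u] = ys[u + 1] := by
  constructor
  · intro hnd
    by_contra hadj
    push Not at hadj
    apply hnd
    have hch : List.IsChain (· < ·) ys := by
      rw [List.isChain_iff_getElem]
      intro i hi
      exact lt_of_le_of_ne ((List.isChain_iff_getElem.mp h.isChain) i hi) (hadj i hi)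
    exact ((List.isChain_iff_pairwise.mp hch).imp ne_of_lt)
  · rintro ⟨u, hu, he⟩
    intro hnd
    have := (hnd.getElem_inj_iff (hi := Nat.lt_of_succ_lt hu) (hj := hu)).mp he
    omega

-- hasDup is exactly "not all elements distinct"
theorem hasDup_iff_not_nodup (xs : List Int) : hasDup xs = true ↔ ¬ xs.Nodup := by
  unfold hasDup
  set ys := PySem.List.sorted xs (fun x => x) false with hys
  have hperm : ys.Perm xs := PySem.List.sorted_perm xs (fun x => x) false
  rw [← hperm.nodup_iff,
      pairwise_le_not_nodup_iff ys (PySem.List.sorted_pairwise xs (fun x => x))]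
  rw [List.any_eq_true]
  constructor
  · rintro ⟨t, htm, hp⟩
    obtain ⟨ht0, htl⟩ := PySem.List.mem_pyRange_one.mp htm
    obtain ⟨u, rfl⟩ := Int.eq_ofNat_of_zero_le ht0
    have hu : u + 1 < ys.length := by omega
    refine ⟨u, hu, ?_⟩
    have := beq_iff_eq.mp hp
    rw [show ((u : Int) + 1) = ((u + 1 : Nat) : Int) by push_cast; ring] at this
    rw [PySem.List.pyGetD_natCast, PySem.List.pyGetD_natCast,
        List.getD_eq_getElem _ _ (by omega), List.getD_eq_getElem _ _ hu] at this
    exact this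
  · rintro ⟨u, hu, he⟩
    refine ⟨(u : Int), PySem.List.mem_pyRange_one.mpr ⟨by omega, by omega⟩, ?_⟩
    rw [beq_iff_eq,
        show ((u : Int) + 1) = ((u + 1 : Nat) : Int) by push_cast; ring,
        PySem.List.pyGetD_natCast, PySem.List.pyGetD_natCast,
        List.getD_eq_getElem _ _ (by omega), List.getD_eq_getElem _ _ hu]
    exact he

-- a list with a repeat strictly shrinks under set()
theorem length_ofList_lt (xs : List Int) (h : ¬ xs.Nodup) :
    (PySem.Set.ofList xs).length < xs.length := by
  induction xs with
  | nil => exact absurd List.nodup_nil h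
  | cons x xs ih =>
    rw [PySem.Set.ofList_cons]
    by_cases hx : x ∈ xs
    · have hmem : x ∈ PySem.Set.ofList xs := (PySem.Set.mem_ofList xs x).mpr hx
      have : ((PySem.Set.ofList xs).discard x).length < (PySem.Set.ofList xs).length := by
        have : (PySem.Set.ofList xs).discard x = (PySem.Set.ofList xs).filter (fun y => !(y == x)) := rfl
        rw [this]
        apply List.length_filter_lt_length_iff_exists.mpr
        exact ⟨x, hmem, by simp⟩
      have hle := PySem.Set.length_ofList_le xs
      simp only [List.length_cons]
      omega
    · have hxs : ¬ xs.Nodup := fun hn => h (List.nodup_cons.mpr ⟨hx, hn⟩)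
      have hlt := ih hxs
      have : ((PySem.Set.ofList xs).discard x).length ≤ (PySem.Set.ofList xs).length := by
        have : (PySem.Set.ofList xs).discard x = (PySem.Set.ofList xs).filter (fun y => !(y == x)) := rfl
        rw [this]; exact List.length_filter_le _ _
      simp only [List.length_cons]
      omega

-- A's set-size test and B's sort-and-scan test agree
theorem hasDup_iff_set (xs : List Int) :
    hasDup xs = true ↔ xs.length ≠ (PySem.Set.ofList xs).length := by
  rw [hasDup_iff_not_nodup]
  constructor
  · intro h he
    exact absurd (he ▸ length_ofList_lt xs h) (lt_irrefl _)
  · intro hne hnd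
    exact hne (by rw [PySem.Set.ofList_eq_self_of_nodup xs hnd])

-- count-fold = 0/1-sum
theorem foldl_count_eq_sum (l : List Int) (p : Int → Prop) [DecidablePred p] (a : Int) :
    l.foldl (fun a j => if p j then a + 1 else a) a
      = a + (l.map (fun j => if p j then (1 : Int) else 0)).sum := by
  have : (fun (a : Int) (j : Int) => if p j then a + 1 else a)
       = (fun (a : Int) (j : Int) => a + if p j then (1 : Int) else 0) := by
    funext a j; split_ifs <;> ring
  rw [this, PySem.List.foldl_add]

-- ===== VERDICT (by name: the statement is the Claim_ definition above) =====
theorem solve_spec : Claim_equal_solve := by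
  intro matrix n _ _
  unfold Spec_solve
  simp only [solve, solve_alt]
  rw [outer_loop matrix _ (PySem.List.nodup_pyRange_one 0 n) _ (fun i hi => hi) 0 0 0 true]
  rw [PySem.List.foldl_prod_mk
      (f := fun a i => a + PySem.List.pyGetD (PySem.List.pyGetD matrix i []) i 0)
      (g := fun a i => a + if hasDup (PySem.List.pyGetD matrix i []) then (1 : Int) else 0)]
  rw [PySem.List.foldl_add, PySem.List.foldl_add]
  have hcond : ∀ xs : List Int,
      (if hasDup xs then (1 : Int) else 0) = (if xs.length ≠ (PySem.Set.ofList xs).length then (1 : Int) else 0) := by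
    intro xs
    by_cases h : hasDup xs = true
    · rw [if_pos h, if_pos (hasDup_iff_set xs |>.mp h)]
    · rw [if_neg h, if_neg (fun hp => h ((hasDup_iff_set xs).mpr hp))]
  have hr : (PySem.List.pyRange 0 n 1).map
      (fun i => if hasDup (PySem.List.pyGetD matrix i []) then (1 : Int) else 0)
    = (PySem.List.pyRange 0 n 1).map
      (fun i => if (PySem.List.pyGetD matrix i []).length ≠
          (PySem.Set.ofList (PySem.List.pyGetD matrix i [])).length then (1 : Int) else 0) :=
    List.map_congr_left (fun i _ => hcond _)
  have hc : (PySem.List.pyRange 0 n 1).map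
      (fun j => if hasDup (matrix.map (fun row => PySem.List.pyGetD row j 0)) then (1 : Int) else 0)
    = (PySem.List.pyRange 0 n 1).map
      (fun j => if (matrix.map (fun row => PySem.List.pyGetD row j 0)).length ≠
          (PySem.Set.ofList (matrix.map (fun row => PySem.List.pyGetD row j 0))).length
        then (1 : Int) else 0) :=
    List.map_congr_left (fun j _ => hcond _)
  rw [hr, hc]
  by_cases hn : (0 : Int) < n
  · have hne : PySem.List.pyRange 0 n 1 ≠ [] := by
      rw [PySem.List.pyRange_one_cons hn]
      exact List.cons_ne_nil _ _
    rw [if_pos ⟨rfl, hne⟩,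
        foldl_count_eq_sum _ (fun j => (matrix.map (fun row => PySem.List.pyGetD row j 0)).length ≠
          (PySem.Set.ofList (matrix.map (fun row => PySem.List.pyGetD row j 0))).length) 0,
        zero_add]
    simp
  · have h0 : PySem.List.pyRange 0 n 1 = [] := PySem.List.pyRange_one_eq_nil (by omega)
    rw [h0]
    simp
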